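-- pv_equiv track=rewrite | github.com/KnightDurpy/KnightDurpy | proj08-long/annoying_recursion_part2.py | annoying_fibonacci_sequence
-- ===== SOURCE A (Python) =====
-- def annoying_fibonacci_sequence(n):
--     '''
--     takes in an n interger which used to determine
--         the length of the array
--     Parameters: n size
--     Pre-condition: None
--     post-condition: fibonacci array
--     '''
--     if n == 0:
--         return []
--     if n == 1:
--         return [0]
--     if n == 2:
--         return [0,1]
--     if n == 3:
--         return [0,1,1]
--     if n == 4:
--         return annoying_fibonacci_sequence(3)+[2]
--     if n == 5:
--         return annoying_fibonacci_sequence(4)+[3]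
--     if n == 6:
--         return annoying_fibonacci_sequence(5)+[5]
--     return annoying_fibonacci_sequence(n-1) + annoying_fibonacci_sequence(n-2)
-- ===== SOURCE B (Python) =====
-- def annoying_fibonacci_sequence(n):
--     if n <= 0:
--         return []
--     base = [[0], [0, 1], [0, 1, 1], [0, 1, 1, 2], [0, 1, 1, 2, 3], [0, 1, 1, 2, 3, 5]]
--     if n <= 6:
--         return base[n - 1]
--     prev, cur = base[4], base[5]
--     for _ in range(n - 6):
--         prev, cur = cur, cur + prev
--     return cur
-- ===== Notes on version B (the rewrite author's own statement) =====
-- stated objective: alternative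
-- what changed: Replaces the double recursion f(n)=f(n-1)+f(n-2) with an iterative two-accumulator loop that computes each intermediate list once instead of recomputing it exponentially often.
import Mathlib
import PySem

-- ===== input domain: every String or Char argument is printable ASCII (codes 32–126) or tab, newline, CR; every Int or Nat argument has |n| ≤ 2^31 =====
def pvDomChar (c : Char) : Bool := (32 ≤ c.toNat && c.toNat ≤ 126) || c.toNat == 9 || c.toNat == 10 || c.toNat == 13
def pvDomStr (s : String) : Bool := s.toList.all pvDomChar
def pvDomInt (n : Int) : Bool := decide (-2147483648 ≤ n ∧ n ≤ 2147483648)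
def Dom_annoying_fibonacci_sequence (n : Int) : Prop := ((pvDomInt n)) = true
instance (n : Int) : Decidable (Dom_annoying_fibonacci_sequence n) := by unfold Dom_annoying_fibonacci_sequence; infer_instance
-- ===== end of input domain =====

-- B replaces A's double recursion with an iterative two-accumulator loop, computing each list once.


-- ===== PORT A =====
-- A's recursion, on the Nat index (for negative n the Python recursion never terminates; Pre_ excludes it)
def fibA : Nat → List Int
  | 0 => []
  | 1 => [0]
  | 2 => [0, 1]
  | 3 => [0, 1, 1]
  | 4 => fibA 3 ++ [2]
  | 5 => fibA 4 ++ [3]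
  | 6 => fibA 5 ++ [5]
  | n + 7 => fibA (n + 6) ++ fibA (n + 5)

def annoying_fibonacci_sequence (n : Int) : List Int :=
  if n < 0 then [] else fibA n.toNat

-- ===== PORT B =====
-- the loop: k steps of (prev, cur) := (cur, cur ++ prev)
def fibBloop : Nat → List Int × List Int → List Int × List Int
  | 0, st => st
  | k + 1, (prev, cur) => fibBloop k (cur, cur ++ prev)

def annoying_fibonacci_sequence_alt (n : Int) : List Int :=
  if n ≤ 0 then []
  else
    let base : List (List Int) :=
      [[0], [0, 1], [0, 1, 1], [0, 1, 1, 2], [0, 1, 1, 2, 3], [0, 1, 1, 2, 3, 5]]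
    if n ≤ 6 then base.getD (n - 1).toNat []
    else (fibBloop (n - 6).toNat ([0, 1, 1, 2, 3], [0, 1, 1, 2, 3, 5])).2

-- ===== PRECONDITION & SPEC =====
-- Pre_ excludes negative n, where A recurses without bound (Python RecursionError).
def Pre_annoying_fibonacci_sequence (n : Int) : Prop := 0 ≤ n
instance (n : Int) : Decidable (Pre_annoying_fibonacci_sequence n) := by
  unfold Pre_annoying_fibonacci_sequence; infer_instance
def pvWitness_annoying_fibonacci_sequence : Int := 8

def Spec_annoying_fibonacci_sequence (n : Int) (out : List Int) : Prop := out = annoying_fibonacci_sequence_alt n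
instance (n : Int) (out : List Int) : Decidable (Spec_annoying_fibonacci_sequence n out) := by unfold Spec_annoying_fibonacci_sequence; infer_instance

-- ===== CLAIM (what is proved, stated in full; the proofs are below) =====
def Claim_equal_annoying_fibonacci_sequence : Prop := ∀ (n : Int), Dom_annoying_fibonacci_sequence n → Pre_annoying_fibonacci_sequence n → Spec_annoying_fibonacci_sequence n (annoying_fibonacci_sequence n)

-- ===== LEMMAS AND PROOFS =====
theorem fibA_add7 (n : Nat) : fibA (n + 7) = fibA (n + 6) ++ fibA (n + 5) := rfl

theorem fibBloop_inv (k m : Nat) :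
    fibBloop k (fibA (m + 5), fibA (m + 6)) = (fibA (m + k + 5), fibA (m + k + 6)) := by
  induction k generalizing m with
  | zero => rfl
  | succ k ih =>
    have : fibBloop (k + 1) (fibA (m + 5), fibA (m + 6))
        = fibBloop k (fibA (m + 6), fibA (m + 6) ++ fibA (m + 5)) := rfl
    rw [this, ← fibA_add7]
    have h2 : fibA (m + 7) = fibA ((m + 1) + 6) := by ring_nf
    have h3 : fibA (m + 6) = fibA ((m + 1) + 5) := by ring_nf
    rw [h2, h3, ih]
    congr 2 <;> omega

theorem fibA_eq_alt (k : Nat) : fibA k = annoying_fibonacci_sequence_alt (k : Int) := by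
  match k with
  | 0 => rfl
  | 1 => decide
  | 2 => decide
  | 3 => decide
  | 4 => decide
  | 5 => decide
  | 6 => decide
  | n + 7 =>
    show fibA (n + 7) = annoying_fibonacci_sequence_alt ((n : Int) + 7)
    unfold annoying_fibonacci_sequence_alt
    rw [if_neg (by omega), if_neg (by omega)]
    have ht : ((n : Int) + 7 - 6).toNat = n + 1 := by omega
    rw [ht]
    have h5 : ([0, 1, 1, 2, 3] : List Int) = fibA 5 := by decide
    have h6 : ([0, 1, 1, 2, 3, 5] : List Int) = fibA 6 := by decide
    rw [h5, h6]
    have := fibBloop_inv (n + 1) 0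
    simp only [Nat.zero_add] at this
    rw [this]

-- ===== VERDICT (by name: the statement is the Claim_ definition above) =====
theorem annoying_fibonacci_sequence_spec : Claim_equal_annoying_fibonacci_sequence := by
  intro n _ hpre
  have hp : 0 ≤ n := hpre
  unfold Spec_annoying_fibonacci_sequence annoying_fibonacci_sequence
  rw [if_neg (by omega)]
  have h : (n.toNat : Int) = n := Int.toNat_of_nonneg hp
  rw [← h]
  exact fibA_eq_alt n.toNat
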